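-- pv_equiv track=rewrite | github.com/aibaellord/BaelTheLordOfAll-AI | core/swarm/collective_memory.py | _is_conflict
-- ===== SOURCE A (Python) =====
-- from typing import Any, Callable, Dict, List, Optional, Set, Tuple
--
-- def _is_conflict(
--
--     vc1: Dict[str, int],
--     vc2: Dict[str, int],
-- ) -> bool:
--     """Check if vector clocks indicate conflict."""
--     all_nodes = set(vc1.keys()) | set(vc2.keys())
--
--     vc1_greater = False
--     vc2_greater = False
--
--     for node in all_nodes:
--         v1 = vc1.get(node, 0)
--         v2 = vc2.get(node, 0)
--
--         if v1 > v2: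
--             vc1_greater = True
--         elif v2 > v1:
--             vc2_greater = True
--
--     return vc1_greater and vc2_greater
-- ===== SOURCE B (Python) =====
-- def _is_conflict(vc1, vc2):
--     """Conflict = incomparable clocks, detected by a sorted two-pointer merge of the item lists."""
--     a = sorted(vc1.items())
--     b = sorted(vc2.items())
--     i = j = 0
--     gt1 = gt2 = False
--     while i < len(a) or j < len(b):
--         if j == len(b) or (i < len(a) and a[i][0] < b[j][0]):
--             v1, v2 = a[i][1], 0
--             i += 1
--         elif i == len(a) or b[j][0] < a[i][0]:
--             v1, v2 = 0, b[j][1]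
--             j += 1
--         else:
--             v1, v2 = a[i][1], b[j][1]
--             i += 1
--             j += 1
--         if v1 > v2:
--             gt1 = True
--         elif v2 > v1:
--             gt2 = True
--     return gt1 and gt2
-- ===== Notes on version B (the rewrite author's own statement) =====
-- stated objective: alternative
-- what changed: Replaces A's set-union scan with default-0 dict lookups per node by sorting both item lists and running a two-pointer merge that aligns equal keys and fills missing ones with 0; Pre_ only excludes association lists with duplicate keys, which represent no Python dict.
import Mathlib
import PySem

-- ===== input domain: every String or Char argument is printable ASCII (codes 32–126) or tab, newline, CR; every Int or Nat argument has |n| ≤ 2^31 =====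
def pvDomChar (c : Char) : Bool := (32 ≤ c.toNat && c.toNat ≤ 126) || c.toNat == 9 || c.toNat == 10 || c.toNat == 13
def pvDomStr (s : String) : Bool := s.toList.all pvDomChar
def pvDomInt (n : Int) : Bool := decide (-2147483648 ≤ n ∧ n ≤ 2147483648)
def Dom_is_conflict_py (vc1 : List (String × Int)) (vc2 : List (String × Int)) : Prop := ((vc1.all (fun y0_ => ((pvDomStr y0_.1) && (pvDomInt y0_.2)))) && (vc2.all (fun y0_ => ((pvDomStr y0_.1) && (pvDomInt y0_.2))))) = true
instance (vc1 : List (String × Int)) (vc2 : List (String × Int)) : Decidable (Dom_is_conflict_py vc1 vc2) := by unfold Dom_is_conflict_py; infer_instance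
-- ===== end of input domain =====

-- B replaces A's set-union scan with default-0 dict lookups by a sort-then-two-pointer merge of the item lists; objective: alternative.

-- ===== PORT A =====
def is_conflict_py (vc1 : List (String × Int)) (vc2 : List (String × Int)) : Bool :=
  let allNodes : PySem.Set String :=
    PySem.Set.union (PySem.Set.ofList (vc1.map Prod.fst)) (PySem.Set.ofList (vc2.map Prod.fst))
  let flags := allNodes.foldl (fun (st : Bool × Bool) node =>
    let v1 := (PySem.Dict.mk vc1).getD node 0
    let v2 := (PySem.Dict.mk vc2).getD node 0
    if v1 > v2 then (true, st.2)
    else if v2 > v1 then (st.1, true)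
    else st) (false, false)
  flags.1 && flags.2

-- ===== PORT B =====
-- the body of B's while loop: update the (gt1, gt2) flags from one merged pair of values
def pvStep (v1 v2 : Int) (g : Bool × Bool) : Bool × Bool :=
  if v1 > v2 then (true, g.2)
  else if v2 > v1 then (g.1, true)
  else g

-- B's two-pointer merge over the two key-sorted item lists (the while loop; the pointers become list tails)
def pvMerge : List (String × Int) → List (String × Int) → Bool × Bool → Bool × Bool
  | [], [], g => g
  | (_, v1) :: as, [], g => pvMerge as [] (pvStep v1 0 g)
  | [], (_, v2) :: bs, g => pvMerge [] bs (pvStep 0 v2 g)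
  | (k1, v1) :: as, (k2, v2) :: bs, g =>
      if k1 < k2 then pvMerge as ((k2, v2) :: bs) (pvStep v1 0 g)
      else if k2 < k1 then pvMerge ((k1, v1) :: as) bs (pvStep 0 v2 g)
      else pvMerge as bs (pvStep v1 v2 g)
termination_by a b _ => a.length + b.length

def is_conflict_py_alt (vc1 : List (String × Int)) (vc2 : List (String × Int)) : Bool :=
  -- sorted(vc.items()): with the distinct keys Pre_ demands, Python's tuple order is the key order
  let a := PySem.List.sorted vc1 (fun p => p.1) false
  let b := PySem.List.sorted vc2 (fun p => p.1) false
  let g := pvMerge a b (false, false)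
  g.1 && g.2

-- ===== PRECONDITION & SPEC =====
-- Pre_ excludes association lists with duplicate keys: they represent no Python dict (A's domain is
-- dicts, whose keys are always distinct, so Pre_ excludes no input A accepts).
def Pre_is_conflict_py (vc1 : List (String × Int)) (vc2 : List (String × Int)) : Prop :=
  (vc1.map Prod.fst).Nodup ∧ (vc2.map Prod.fst).Nodup
instance (vc1 : List (String × Int)) (vc2 : List (String × Int)) : Decidable (Pre_is_conflict_py vc1 vc2) := by unfold Pre_is_conflict_py; infer_instance

def pvWitness_is_conflict_py : (List (String × Int)) × (List (String × Int)) :=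
  ([("a", 2), ("b", 0)], [("a", 1), ("c", 3)])

def Spec_is_conflict_py (vc1 : List (String × Int)) (vc2 : List (String × Int)) (out : Bool) : Prop := out = is_conflict_py_alt vc1 vc2
instance (vc1 : List (String × Int)) (vc2 : List (String × Int)) (out : Bool) : Decidable (Spec_is_conflict_py vc1 vc2 out) := by unfold Spec_is_conflict_py; infer_instance

-- ===== CLAIM (what is proved, stated in full; the proofs are below) =====
def Claim_equal_is_conflict_py : Prop := ∀ (vc1 : List (String × Int)) (vc2 : List (String × Int)), Dom_is_conflict_py vc1 vc2 → Pre_is_conflict_py vc1 vc2 → Spec_is_conflict_py vc1 vc2 (is_conflict_py vc1 vc2)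

-- ===== LEMMAS AND PROOFS =====

-- "some key of ks makes x strictly greater than y" — the common denotation of both programs
def pvAnyGT (ks : List String) (x y : List (String × Int)) : Bool :=
  ks.any (fun k => decide ((PySem.Dict.mk x).getD k 0 > (PySem.Dict.mk y).getD k 0))

def pvGT (x y : List (String × Int)) : Bool :=
  pvAnyGT (x.map Prod.fst ++ y.map Prod.fst) x y

theorem pvAny_congrMem {α : Type} (l : List α) (p q : α → Bool) (h : ∀ a ∈ l, p a = q a) :
    l.any p = l.any q := by
  induction l with
  | nil => rfl
  | cons x xs ih =>
    simp only [List.any_cons, h x (by simp)]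
    rw [ih (fun a ha => h a (by simp [ha]))]

theorem pvAnyGT_congr (ks1 ks2 : List String) (x y : List (String × Int))
    (h : ∀ k, k ∈ ks1 ↔ k ∈ ks2) : pvAnyGT ks1 x y = pvAnyGT ks2 x y := by
  unfold pvAnyGT
  rw [Bool.eq_iff_iff]
  simp only [List.any_eq_true]
  constructor
  · rintro ⟨a, ha, hp⟩; exact ⟨a, (h a).mp ha, hp⟩
  · rintro ⟨a, ha, hp⟩; exact ⟨a, (h a).mpr ha, hp⟩

theorem pvStep_eq (v1 v2 : Int) (g : Bool × Bool) :
    pvStep v1 v2 g = (g.1 || decide (v1 > v2), g.2 || decide (v2 > v1)) := by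
  unfold pvStep
  by_cases h1 : v1 > v2
  · have h2 : ¬ v2 > v1 := by omega
    simp [h1, h2]
  · by_cases h2 : v2 > v1 <;> simp [h1, h2]

theorem getD_mk_cons_self (k : String) (v : Int) (rest : List (String × Int)) :
    (PySem.Dict.mk ((k, v) :: rest)).getD k 0 = v := by
  simp [PySem.Dict.getD_eq_get?_getD, PySem.Dict.get?_mk_cons]

theorem getD_mk_cons_ne (k k' : String) (v : Int) (rest : List (String × Int)) (h : k ≠ k') :
    (PySem.Dict.mk ((k, v) :: rest)).getD k' 0 = (PySem.Dict.mk rest).getD k' 0 := by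
  simp [PySem.Dict.getD_eq_get?_getD, PySem.Dict.get?_mk_cons, h]

theorem getD_mk_not_mem (k : String) (x : List (String × Int)) (h : k ∉ x.map Prod.fst) :
    (PySem.Dict.mk x).getD k 0 = 0 := by
  induction x with
  | nil => rfl
  | cons p rest ih =>
    obtain ⟨kp, vp⟩ := p
    simp only [List.map_cons, List.mem_cons, not_or] at h
    rw [getD_mk_cons_ne kp k vp rest (fun he => h.1 he.symm)]
    exact ih h.2

-- peel one pair, whose key is fresh in both tails, off the LEFT list of pvGT (in both operand orders)
theorem pvGT_cons_left (k : String) (v : Int) (as b : List (String × Int))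
    (ha : k ∉ as.map Prod.fst) (hb : k ∉ b.map Prod.fst) :
    pvGT ((k, v) :: as) b = (decide (v > (PySem.Dict.mk b).getD k 0) || pvGT as b) ∧
    pvGT b ((k, v) :: as) = (decide ((PySem.Dict.mk b).getD k 0 > v) || pvGT b as) := by
  have hfresh : ∀ k', k' ∈ as.map Prod.fst ++ b.map Prod.fst → k ≠ k' := by
    intro k' hk' he; subst he
    rcases List.mem_append.mp hk' with h | h
    · exact ha h
    · exact hb h
  have hval : ∀ k', k' ∈ as.map Prod.fst ++ b.map Prod.fst →
      (PySem.Dict.mk ((k, v) :: as)).getD k' 0 = (PySem.Dict.mk as).getD k' 0 := by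
    intro k' hk'; exact getD_mk_cons_ne k k' v as (hfresh k' hk')
  constructor
  · unfold pvGT pvAnyGT
    simp only [List.map_cons, List.cons_append, List.any_cons]
    congr 1
    · rw [getD_mk_cons_self]
    · exact pvAny_congrMem _ _ _ (fun k' hk' => by rw [hval k' hk'])
  · have hmem : ∀ k', k' ∈ b.map Prod.fst ++ ((k, v) :: as).map Prod.fst ↔
        k' ∈ k :: (b.map Prod.fst ++ as.map Prod.fst) := by
      intro k'
      simp only [List.map_cons, List.mem_append, List.mem_cons]
      tauto
    calc pvGT b ((k, v) :: as)
        = pvAnyGT (k :: (b.map Prod.fst ++ as.map Prod.fst)) b ((k, v) :: as) :=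
          pvAnyGT_congr _ _ _ _ hmem
      _ = (decide ((PySem.Dict.mk b).getD k 0 > v) ||
            pvAnyGT (b.map Prod.fst ++ as.map Prod.fst) b ((k, v) :: as)) := by
          unfold pvAnyGT
          rw [List.any_cons, getD_mk_cons_self]
      _ = (decide ((PySem.Dict.mk b).getD k 0 > v) || pvGT b as) := by
          congr 1
          exact pvAny_congrMem _ _ _ (fun k' hk' => by
            rw [hval k' (by
              rcases List.mem_append.mp hk' with h | h
              · exact List.mem_append.mpr (Or.inr h)
              · exact List.mem_append.mpr (Or.inl h))])

-- peel an equal key off both lists at once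
theorem pvGT_cons_both (k : String) (v1 v2 : Int) (as bs : List (String × Int))
    (ha : k ∉ as.map Prod.fst) (hb : k ∉ bs.map Prod.fst) :
    pvGT ((k, v1) :: as) ((k, v2) :: bs) = (decide (v1 > v2) || pvGT as bs) := by
  have hfresh : ∀ k', k' ∈ as.map Prod.fst ++ bs.map Prod.fst → k ≠ k' := by
    intro k' hk' he; subst he
    rcases List.mem_append.mp hk' with h | h
    · exact ha h
    · exact hb h
  have hmem : ∀ k', k' ∈ ((k, v1) :: as).map Prod.fst ++ ((k, v2) :: bs).map Prod.fst ↔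
      k' ∈ k :: (as.map Prod.fst ++ bs.map Prod.fst) := by
    intro k'
    simp only [List.map_cons, List.mem_append, List.mem_cons]
    tauto
  calc pvGT ((k, v1) :: as) ((k, v2) :: bs)
      = pvAnyGT (k :: (as.map Prod.fst ++ bs.map Prod.fst)) ((k, v1) :: as) ((k, v2) :: bs) :=
        pvAnyGT_congr _ _ _ _ hmem
    _ = (decide (v1 > v2) ||
          pvAnyGT (as.map Prod.fst ++ bs.map Prod.fst) ((k, v1) :: as) ((k, v2) :: bs)) := by
        unfold pvAnyGT
        rw [List.any_cons, getD_mk_cons_self, getD_mk_cons_self]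
    _ = (decide (v1 > v2) || pvGT as bs) := by
        congr 1
        exact pvAny_congrMem _ _ _ (fun k' hk' => by
          rw [getD_mk_cons_ne k k' v1 as (hfresh k' hk'), getD_mk_cons_ne k k' v2 bs (hfresh k' hk')])

-- the merge walk computes exactly the two domination-failure bits, given strictly increasing keys
theorem pvMerge_spec (n : Nat) : ∀ (a b : List (String × Int)) (g : Bool × Bool),
    a.length + b.length ≤ n →
    (a.map Prod.fst).Pairwise (· < ·) → (b.map Prod.fst).Pairwise (· < ·) →
    pvMerge a b g = (g.1 || pvGT a b, g.2 || pvGT b a) := by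
  induction n with
  | zero =>
    intro a b g hn _ _
    cases a with
    | cons p as => exfalso; simp only [List.length_cons] at hn; omega
    | nil =>
      cases b with
      | cons p bs => exfalso; simp only [List.length_cons] at hn; omega
      | nil => simp [pvMerge, pvGT, pvAnyGT]
  | succ n ih =>
    intro a b g hn hpa hpb
    cases a with
    | nil =>
      cases b with
      | nil => simp [pvMerge, pvGT, pvAnyGT]
      | cons q bs =>
        obtain ⟨k2, v2⟩ := q
        simp only [List.map_cons, List.pairwise_cons] at hpb
        have hfb : k2 ∉ bs.map Prod.fst := fun h => lt_irrefl k2 (hpb.1 k2 h)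
        obtain ⟨hL, hR⟩ := pvGT_cons_left k2 v2 bs [] hfb (by simp)
        rw [pvMerge, ih [] bs (pvStep 0 v2 g)
            (by simp only [List.length_cons, List.length_nil] at hn ⊢; omega) (by simp) hpb.2,
          pvStep_eq, hL, hR, getD_mk_not_mem k2 [] (by simp)]
        simp [Bool.or_assoc]
    | cons p as =>
      obtain ⟨k1, v1⟩ := p
      simp only [List.map_cons, List.pairwise_cons] at hpa
      have hfa : k1 ∉ as.map Prod.fst := fun h => lt_irrefl k1 (hpa.1 k1 h)
      cases b with
      | nil =>
        obtain ⟨hL, hR⟩ := pvGT_cons_left k1 v1 as [] hfa (by simp)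
        rw [pvMerge, ih as [] (pvStep v1 0 g)
            (by simp only [List.length_cons, List.length_nil] at hn ⊢; omega) hpa.2 (by simp),
          pvStep_eq, hL, hR, getD_mk_not_mem k1 [] (by simp)]
        simp [Bool.or_assoc]
      | cons q bs =>
        obtain ⟨k2, v2⟩ := q
        simp only [List.map_cons, List.pairwise_cons] at hpb
        have hfb : k2 ∉ bs.map Prod.fst := fun h => lt_irrefl k2 (hpb.1 k2 h)
        have hpb' : (((k2, v2) :: bs).map Prod.fst).Pairwise (· < ·) := by
          simp only [List.map_cons, List.pairwise_cons]; exact hpb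
        have hpa' : (((k1, v1) :: as).map Prod.fst).Pairwise (· < ·) := by
          simp only [List.map_cons, List.pairwise_cons]; exact hpa
        rw [pvMerge]
        by_cases h12 : k1 < k2
        · have hfb' : k1 ∉ ((k2, v2) :: bs).map Prod.fst := by
            simp only [List.map_cons, List.mem_cons, not_or]
            exact ⟨ne_of_lt h12, fun h => lt_asymm h12 (hpb.1 k1 h)⟩
          obtain ⟨hL, hR⟩ := pvGT_cons_left k1 v1 as ((k2, v2) :: bs) hfa hfb'
          rw [if_pos h12, ih as ((k2, v2) :: bs) (pvStep v1 0 g)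
              (by simp only [List.length_cons] at hn ⊢; omega) hpa.2 hpb',
            pvStep_eq, hL, hR, getD_mk_not_mem k1 ((k2, v2) :: bs) hfb']
          simp [Bool.or_assoc]
        · by_cases h21 : k2 < k1
          · have hfa' : k2 ∉ ((k1, v1) :: as).map Prod.fst := by
              simp only [List.map_cons, List.mem_cons, not_or]
              exact ⟨ne_of_lt h21, fun h => lt_asymm h21 (hpa.1 k2 h)⟩
            obtain ⟨hL, hR⟩ := pvGT_cons_left k2 v2 bs ((k1, v1) :: as) hfb hfa'
            rw [if_neg h12, if_pos h21, ih ((k1, v1) :: as) bs (pvStep 0 v2 g)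
                (by simp only [List.length_cons] at hn ⊢; omega) hpa' hpb.2,
              pvStep_eq, hL, hR, getD_mk_not_mem k2 ((k1, v1) :: as) hfa']
            simp [Bool.or_assoc]
          · have hk : k1 = k2 := le_antisymm (le_of_not_gt h21) (le_of_not_gt h12)
            subst hk
            rw [if_neg h12, if_neg h21, ih as bs (pvStep v1 v2 g)
                (by simp only [List.length_cons] at hn ⊢; omega) hpa.2 hpb.2,
              pvStep_eq, pvGT_cons_both k1 v1 v2 as bs hfa hfb,
              pvGT_cons_both k1 v2 v1 bs as hfb hfa]
            simp [Bool.or_assoc]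

-- on key-nodup association lists, lookup only depends on the set of items
theorem getD_mk_perm (x x' : List (String × Int)) (hperm : x.Perm x')
    (hnodup : (x.map Prod.fst).Nodup) (k : String) :
    (PySem.Dict.mk x).getD k 0 = (PySem.Dict.mk x').getD k 0 := by
  have hnodup' : (x'.map Prod.fst).Nodup := ((hperm.map Prod.fst).nodup_iff).mp hnodup
  have hk : (PySem.Dict.mk x).get? k = (PySem.Dict.mk x').get? k := by
    cases h : (PySem.Dict.mk x).get? k with
    | some v =>
      have hm : (k, v) ∈ x := (PySem.Dict.get?_eq_some_iff_mem_items _ k v hnodup).mp h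
      exact ((PySem.Dict.get?_eq_some_iff_mem_items _ k v hnodup').mpr (hperm.mem_iff.mp hm)).symm
    | none =>
      cases h' : (PySem.Dict.mk x').get? k with
      | none => rfl
      | some v =>
        have hm : (k, v) ∈ x' := (PySem.Dict.get?_eq_some_iff_mem_items _ k v hnodup').mp h'
        have hx : (PySem.Dict.mk x).get? k = some v :=
          (PySem.Dict.get?_eq_some_iff_mem_items _ k v hnodup).mpr (hperm.mem_iff.mpr hm)
        rw [h] at hx; cases hx
  rw [PySem.Dict.getD_eq_get?_getD, PySem.Dict.getD_eq_get?_getD, hk]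

theorem pvGT_perm (a x b y : List (String × Int)) (hax : a.Perm x) (hby : b.Perm y)
    (hx : (x.map Prod.fst).Nodup) (hy : (y.map Prod.fst).Nodup) :
    pvGT a b = pvGT x y := by
  have hna : (a.map Prod.fst).Nodup := ((hax.map Prod.fst).nodup_iff).mpr hx
  have hnb : (b.map Prod.fst).Nodup := ((hby.map Prod.fst).nodup_iff).mpr hy
  have hmem : ∀ k, k ∈ a.map Prod.fst ++ b.map Prod.fst ↔ k ∈ x.map Prod.fst ++ y.map Prod.fst := by
    intro k
    simp only [List.mem_append]
    rw [(hax.map Prod.fst).mem_iff, (hby.map Prod.fst).mem_iff]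
  calc pvGT a b = pvAnyGT (x.map Prod.fst ++ y.map Prod.fst) a b := pvAnyGT_congr _ _ _ _ hmem
    _ = pvGT x y :=
      pvAny_congrMem _ _ _ (fun k _ => by
        rw [getD_mk_perm a x hax hna k, getD_mk_perm b y hby hnb k])

-- sorting a key-nodup item list by key makes the key sequence strictly increasing
theorem pvSortedStrict (x : List (String × Int)) (h : (x.map Prod.fst).Nodup) :
    ((PySem.List.sorted x (fun p => p.1) false).map Prod.fst).Pairwise (· < ·) := by
  have hperm := PySem.List.sorted_perm x (fun p => p.1) false
  have hn : ((PySem.List.sorted x (fun p => p.1) false).map Prod.fst).Nodup :=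
    ((hperm.map Prod.fst).nodup_iff).mpr h
  have hle : ((PySem.List.sorted x (fun p => p.1) false).map Prod.fst).Pairwise (· ≤ ·) := by
    rw [List.pairwise_map]
    exact PySem.List.sorted_pairwise x (fun p => p.1)
  exact (hle.and hn).imp (fun hab => lt_of_le_of_ne hab.1 hab.2)

-- A's two-flag fold computes (any v1>v2, any v2>v1) over the node list
theorem pv_fold_flags (f g : String → Int) (l : List String) (st : Bool × Bool) :
    l.foldl (fun (st : Bool × Bool) node =>
      if f node > g node then (true, st.2)
      else if g node > f node then (st.1, true)
      else st) st
    = (st.1 || l.any (fun n => decide (f n > g n)),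
       st.2 || l.any (fun n => decide (g n > f n))) := by
  induction l generalizing st with
  | nil => simp
  | cons x xs ih =>
    simp only [List.foldl_cons, List.any_cons]
    by_cases h1 : f x > g x
    · have h2 : ¬ g x > f x := by omega
      simp [h1, h2, ih]
    · by_cases h2 : g x > f x
      · simp [h1, h2, ih]
      · simp [h1, h2, ih]

-- ===== VERDICT (by name: the statement is the Claim_ definition above) =====
theorem is_conflict_py_spec : Claim_equal_is_conflict_py := by
  intro vc1 vc2 _ hpre
  obtain ⟨h1, h2⟩ := hpre
  unfold Spec_is_conflict_py is_conflict_py is_conflict_py_alt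
  simp only [pv_fold_flags, Bool.false_or]
  have hs1 := PySem.List.sorted_perm vc1 (fun p => p.1) false
  have hs2 := PySem.List.sorted_perm vc2 (fun p => p.1) false
  rw [pvMerge_spec
      ((PySem.List.sorted vc1 (fun p => p.1) false).length +
        (PySem.List.sorted vc2 (fun p => p.1) false).length)
      _ _ (false, false) le_rfl (pvSortedStrict vc1 h1) (pvSortedStrict vc2 h2)]
  simp only [Bool.false_or]
  rw [pvGT_perm _ vc1 _ vc2 hs1 hs2 h1 h2, pvGT_perm _ vc2 _ vc1 hs2 hs1 h2 h1]
  show (pvAnyGT (PySem.Set.union (PySem.Set.ofList (vc1.map Prod.fst)) (PySem.Set.ofList (vc2.map Prod.fst))) vc1 vc2 &&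
       pvAnyGT (PySem.Set.union (PySem.Set.ofList (vc1.map Prod.fst)) (PySem.Set.ofList (vc2.map Prod.fst))) vc2 vc1)
     = (pvGT vc1 vc2 && pvGT vc2 vc1)
  have hmem12 : ∀ k, k ∈ PySem.Set.union (PySem.Set.ofList (vc1.map Prod.fst)) (PySem.Set.ofList (vc2.map Prod.fst)) ↔
      k ∈ vc1.map Prod.fst ++ vc2.map Prod.fst := by
    intro k
    rw [PySem.Set.mem_union, PySem.Set.mem_ofList, PySem.Set.mem_ofList, List.mem_append]
  have hmem21 : ∀ k, k ∈ PySem.Set.union (PySem.Set.ofList (vc1.map Prod.fst)) (PySem.Set.ofList (vc2.map Prod.fst)) ↔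
      k ∈ vc2.map Prod.fst ++ vc1.map Prod.fst := by
    intro k
    rw [hmem12 k, List.mem_append, List.mem_append]
    tauto
  rw [pvAnyGT_congr _ _ vc1 vc2 hmem12, pvAnyGT_congr _ _ vc2 vc1 hmem21]
  rfl
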